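-- pv_equiv track=rewrite | github.com/Nour-Sadek/C-Elegans-Contrastive-Learning | download_files.py | get_gene_id
-- ===== SOURCE A (Python) =====
-- def get_gene_id(description):
--     description_list = description.split()  # split by any kind of whitespace
--     # first check for the presence of the "gene" descriptor
--     for item in description_list:
--         if item.startswith("gene="):
--             return item[5:]
--     # if the "gene" descriptor does not exist, then search for the "transcript" descriptor
--     for item in description_list:
--         if item.startswith("transcript="):
--             return item[11:]
--     # if neither exist, return None
--     return None
-- ===== SOURCE B (Python) =====
-- def get_gene_id(description):
--     transcript_id = None
--     for word in description.split():
--         if word.startswith("gene="):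
--             return word[5:]
--         elif word.startswith("transcript=") and transcript_id is None:
--             transcript_id = word[11:]
--     return transcript_id
-- ===== Notes on version B (the rewrite author's own statement) =====
-- stated objective: simpler
-- what changed: Replaces A's two sequential scans over the word list by a single pass that returns immediately on the first gene= word and remembers the first transcript= word in an accumulator.
import Mathlib
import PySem

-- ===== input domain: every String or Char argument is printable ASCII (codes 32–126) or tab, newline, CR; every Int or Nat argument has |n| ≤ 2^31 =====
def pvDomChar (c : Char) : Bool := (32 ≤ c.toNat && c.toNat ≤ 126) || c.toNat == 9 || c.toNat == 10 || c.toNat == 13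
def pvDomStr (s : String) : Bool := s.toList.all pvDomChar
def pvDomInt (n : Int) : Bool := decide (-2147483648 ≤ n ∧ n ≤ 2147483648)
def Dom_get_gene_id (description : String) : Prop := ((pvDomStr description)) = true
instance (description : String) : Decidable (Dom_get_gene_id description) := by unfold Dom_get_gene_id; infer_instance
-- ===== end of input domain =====

-- B collapses A's two sequential scans into one pass with an accumulator (simpler decomposition; same cost).


-- ===== PORT A =====
-- first loop: return item[5:] on the first word starting with "gene="
def geneScan : List String → Option String
  | [] => none
  | w :: ws =>
    if PySem.Str.startswith w "gene=" then some (PySem.Str.slice w (some 5) none)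
    else geneScan ws

-- second loop: return item[11:] on the first word starting with "transcript="
def transScan : List String → Option String
  | [] => none
  | w :: ws =>
    if PySem.Str.startswith w "transcript=" then some (PySem.Str.slice w (some 11) none)
    else transScan ws

def get_gene_id (description : String) : Option String :=
  let description_list := PySem.Str.split₀ description
  match geneScan description_list with
  | some r => some r
  | none => transScan description_list

-- ===== PORT B =====
-- one pass: early return on gene=, remember the first transcript= in the accumulator
def onePass : List String → Option String → Option String
  | [], transcript_id => transcript_id
  | w :: ws, transcript_id =>
    if PySem.Str.startswith w "gene=" then some (PySem.Str.slice w (some 5) none)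
    else if PySem.Str.startswith w "transcript=" && transcript_id.isNone then
      onePass ws (some (PySem.Str.slice w (some 11) none))
    else onePass ws transcript_id

def get_gene_id_alt (description : String) : Option String :=
  onePass (PySem.Str.split₀ description) none

-- ===== PRECONDITION & SPEC =====
def Spec_get_gene_id (description : String) (out : Option String) : Prop := out = get_gene_id_alt description
instance (description : String) (out : Option String) : Decidable (Spec_get_gene_id description out) := by unfold Spec_get_gene_id; infer_instance

-- ===== CLAIM (what is proved, stated in full; the proofs are below) =====
def Claim_equal_get_gene_id : Prop := ∀ (description : String), Dom_get_gene_id description → Spec_get_gene_id description (get_gene_id description)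

-- ===== LEMMAS AND PROOFS =====
theorem onePass_eq (ws : List String) : ∀ acc,
    onePass ws acc = (geneScan ws).or (acc.or (transScan ws)) := by
  induction ws with
  | nil => intro acc; simp [onePass, geneScan, transScan]
  | cons w ws ih =>
    intro acc
    by_cases hg : PySem.Chars.startswith w.toList ['g','e','n','e','='] = true
    · simp [onePass, geneScan, hg]
    · by_cases ht : PySem.Chars.startswith w.toList ['t','r','a','n','s','c','r','i','p','t','='] = true
      · cases acc with
        | none => simp [onePass, geneScan, transScan, hg, ht, ih]
        | some a => simp [onePass, geneScan, transScan, hg, ht, ih]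
      · simp [onePass, geneScan, transScan, hg, ht, ih]

theorem get_gene_id_spec : Claim_equal_get_gene_id := by
  intro description _
  show get_gene_id description = get_gene_id_alt description
  unfold get_gene_id get_gene_id_alt
  rw [onePass_eq]
  cases h : geneScan (PySem.Str.split₀ description) <;> simp [h]

-- ===== VERDICT (by name: the statement is the Claim_ definition above) =====
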